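-- pv_equiv track=rewrite | github.com/gus-an/algorithm | 2020/05-4/dump/backTracking_1759.py | isVaild
-- ===== SOURCE A (Python) =====
-- mo = ['a', 'e', 'i', 'o', 'u']
--
-- def isVaild(password):
--   cnt = 0
--   for m in mo:
--     if m in password:
--       cnt += 1
--
--   if cnt > 0 and len(password) - cnt >= 2:
--     return True
--   else:
--     return False
-- ===== SOURCE B (Python) =====
-- def isVaild(password):
--   seen = set()
--   for c in password:
--     if c in 'aeiou':
--       seen.add(c)
--   cnt = len(seen)
--   return cnt > 0 and len(password) - cnt >= 2
-- ===== Notes on version B (the rewrite author's own statement) =====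
-- stated objective: idiomatic
-- what changed: One pass over the password collecting the vowels it contains into a set, instead of five substring scans of the password (one per vowel); the final test is unchanged.
import Mathlib
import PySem

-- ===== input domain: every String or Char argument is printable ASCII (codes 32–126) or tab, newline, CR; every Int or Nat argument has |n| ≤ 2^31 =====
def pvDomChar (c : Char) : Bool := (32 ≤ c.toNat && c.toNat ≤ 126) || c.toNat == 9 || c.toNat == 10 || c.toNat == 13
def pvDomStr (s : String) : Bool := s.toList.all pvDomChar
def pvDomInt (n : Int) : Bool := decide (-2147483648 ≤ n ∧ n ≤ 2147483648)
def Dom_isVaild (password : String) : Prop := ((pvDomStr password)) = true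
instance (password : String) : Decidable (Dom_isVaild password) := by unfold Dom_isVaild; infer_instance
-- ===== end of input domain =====

-- B replaces A's five substring scans of the password (one per vowel) by a single pass over
-- the password that collects the vowels it contains into a set; objective: idiomatic.

-- ===== PORT A =====
-- module constant: mo = ['a', 'e', 'i', 'o', 'u']
def moList : List Char := ['a', 'e', 'i', 'o', 'u']

-- "m in password" with m a one-character string is exactly char membership in the password
def isVaild (password : String) : Bool :=
  let cnt : Int := moList.foldl
    (fun cnt m => if password.toList.contains m then cnt + 1 else cnt) 0
  if cnt > 0 ∧ (password.toList.length : Int) - cnt ≥ 2 then true else false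

-- ===== PORT B =====
def isVaild_alt (password : String) : Bool :=
  let seen : PySem.Set Char := password.toList.foldl
    (fun s c => if moList.contains c then PySem.Set.add s c else s) PySem.Set.empty
  let cnt : Int := PySem.Set.len seen
  decide (cnt > 0 ∧ (password.toList.length : Int) - cnt ≥ 2)

-- ===== PRECONDITION & SPEC =====
def Spec_isVaild (password : String) (out : Bool) : Prop := out = isVaild_alt password
instance (password : String) (out : Bool) : Decidable (Spec_isVaild password out) := by unfold Spec_isVaild; infer_instance

-- ===== CLAIM (what is proved, stated in full; the proofs are below) =====
def Claim_equal_isVaild : Prop := ∀ (password : String), Dom_isVaild password → Spec_isVaild password (isVaild password)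

-- ===== LEMMAS AND PROOFS =====

-- A's counting loop counts the vowels present
theorem foldl_count_filter (p : Char → Bool) (l : List Char) (cnt : Int) :
    l.foldl (fun cnt m => if p m then cnt + 1 else cnt) cnt
      = cnt + ((l.filter p).length : Int) := by
  induction l generalizing cnt with
  | nil => simp
  | cons c t ih =>
    by_cases h : p c = true
    · simp [List.foldl, h, ih]; ring
    · simp [List.foldl, h, ih]

-- membership in B's seen-set
theorem mem_seen_fold (chars : List Char) (s : PySem.Set Char) (x : Char) :
    (x ∈ chars.foldl (fun s c => if moList.contains c then PySem.Set.add s c else s) s)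
      ↔ x ∈ s ∨ (x ∈ moList ∧ x ∈ chars) := by
  induction chars generalizing s with
  | nil => simp
  | cons c t ih =>
    rw [List.foldl_cons]
    by_cases hc : c ∈ moList
    · rw [if_pos (by simpa using hc), ih]
      simp only [PySem.Set.mem_add, List.mem_cons]
      constructor
      · rintro ((hs | rfl) | ⟨hm, ht⟩)
        · exact Or.inl hs
        · exact Or.inr ⟨hc, Or.inl rfl⟩
        · exact Or.inr ⟨hm, Or.inr ht⟩
      · rintro (hs | ⟨hm, rfl | ht⟩)
        · exact Or.inl (Or.inl hs)
        · exact Or.inl (Or.inr rfl)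
        · exact Or.inr ⟨hm, ht⟩
    · rw [if_neg (by simpa using hc), ih]
      simp only [List.mem_cons]
      constructor
      · rintro (hs | ⟨hm, ht⟩)
        · exact Or.inl hs
        · exact Or.inr ⟨hm, Or.inr ht⟩
      · rintro (hs | ⟨hm, rfl | ht⟩)
        · exact Or.inl hs
        · exact absurd hm hc
        · exact Or.inr ⟨hm, ht⟩

theorem nodup_seen_fold (chars : List Char) (s : PySem.Set Char) (hs : s.Nodup) :
    (chars.foldl (fun s c => if moList.contains c then PySem.Set.add s c else s) s).Nodup := by
  induction chars generalizing s with
  | nil => exact hs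
  | cons c t ih =>
    rw [List.foldl_cons]
    by_cases hc : moList.contains c = true
    · rw [if_pos hc]; exact ih _ (PySem.Set.nodup_add _ _ hs)
    · rw [if_neg hc]; exact ih _ hs

theorem seen_len (chars : List Char) :
    ((chars.foldl (fun s c => if moList.contains c then PySem.Set.add s c else s)
        PySem.Set.empty).length : Int)
      = ((moList.filter (fun m => chars.contains m)).length : Int) := by
  have hperm :
      (chars.foldl (fun s c => if moList.contains c then PySem.Set.add s c else s)
          PySem.Set.empty).Perm (moList.filter (fun m => chars.contains m)) := by
    rw [List.perm_ext_iff_of_nodup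
      (nodup_seen_fold chars PySem.Set.empty (by simp [PySem.Set.empty]))
      (List.Nodup.filter _ (by decide))]
    intro a
    rw [mem_seen_fold]
    simp [PySem.Set.empty, List.mem_filter, and_comm]
  rw [hperm.length_eq]

-- ===== VERDICT (by name: the statement is the Claim_ definition above) =====
theorem isVaild_spec : Claim_equal_isVaild := by
  intro password _
  unfold Spec_isVaild isVaild isVaild_alt
  rw [foldl_count_filter]
  show _ = decide (PySem.Set.len _ > 0 ∧ _)
  unfold PySem.Set.len
  rw [seen_len, zero_add]
  show (if ((moList.filter (fun m => password.toList.contains m)).length : Int) > 0 ∧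
        (password.toList.length : Int) - ((moList.filter (fun m => password.toList.contains m)).length : Int) ≥ 2
      then true else false) = _
  split_ifs with h
  · exact (decide_eq_true h).symm
  · exact (decide_eq_false h).symm
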